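-- pv_equiv track=rewrite | github.com/metabrainz/picard-plugins | plugins/instruments/instruments.py | _strip_instrument_prefixes
-- ===== SOURCE A (Python) =====
-- from typing import Generator, Optional
--
-- def _strip_instrument_prefixes(instrument: str) -> Optional[str]:
--   """Returns the instrument name without qualifying prefixes, or None.
--
--   Args:
--     instrument: Potentially prefixed instrument name, e.g., 'solo bassoon'.
--
--   Returns:
--     The instrument name with all prefixes stripped, or None if there's nothing
--     other than prefixes. The all-prefixes case can happen with relationships
--     like 'guest performer'.
--   """
--   instrument_prefixes = {
--       'additional',
--       'guest',
--       'solo',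
--   }
--   remaining = instrument
--   while remaining:
--     prefix, sep, remaining = remaining.partition(' ')
--     if prefix not in instrument_prefixes:
--       return ''.join((prefix, sep, remaining))
--   return None
-- ===== SOURCE B (Python) =====
-- from typing import Optional
--
-- def _strip_instrument_prefixes(instrument: str) -> Optional[str]:
--   """Split once on the space separator, skip the leading run of prefix words, rejoin the rest."""
--   instrument_prefixes = {
--       'additional',
--       'guest',
--       'solo',
--   }
--   words = instrument.split(' ')
--   for i, word in enumerate(words):
--     if word not in instrument_prefixes:
--       result = ' '.join(words[i:])
--       return result or None
--   return None
-- ===== Notes on version B (the rewrite author's own statement) =====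
-- stated objective: simpler
-- what changed: B splits the string once on the space separator into a word list, skips the leading run of prefix words, and rejoins the remaining suffix (an empty join collapsing to None), instead of A's repeated partition-peeling of one word at a time with reassembly via join.
import Mathlib
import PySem

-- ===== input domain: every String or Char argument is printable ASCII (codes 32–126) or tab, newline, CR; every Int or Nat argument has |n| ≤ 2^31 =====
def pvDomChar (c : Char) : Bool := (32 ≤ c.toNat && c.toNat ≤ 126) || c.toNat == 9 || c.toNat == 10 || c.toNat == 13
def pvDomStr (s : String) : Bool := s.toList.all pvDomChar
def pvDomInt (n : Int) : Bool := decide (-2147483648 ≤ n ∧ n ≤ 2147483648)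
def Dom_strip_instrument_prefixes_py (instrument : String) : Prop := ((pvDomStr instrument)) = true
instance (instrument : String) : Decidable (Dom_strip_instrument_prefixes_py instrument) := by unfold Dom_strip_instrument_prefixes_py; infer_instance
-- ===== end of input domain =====

-- B splits the string once on ' ', skips the leading run of prefix words, and rejoins the rest,
-- instead of A's one-word-at-a-time partition peeling; objective: simpler.


-- ===== PORT A =====
-- the set literal {'additional', 'guest', 'solo'}
def pvPrefixesA : PySem.Set (List Char) :=
  PySem.Set.ofList ["additional".toList, "guest".toList, "solo".toList]

-- the while loop of A over `remaining`; remaining.partition(' ') has no PySem primitive and is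
-- ported by hand, exact: prefix = chars before the first ' ', sep = that ' ' (or '' if none),
-- rest = chars after it; ''.join((prefix, sep, remaining)) is prefix ++ sep ++ rest.
def pvALoop (remaining : List Char) : Option (List Char) :=
  if remaining = [] then none
  else
    let pre := remaining.takeWhile (· != ' ')
    let rest := remaining.dropWhile (· != ' ')
    let sep := rest.take 1
    let rem := rest.drop 1
    if pvPrefixesA.contains pre then pvALoop rem
    else some (pre ++ sep ++ rem)
termination_by remaining.length
decreasing_by
  rename_i h _
  have h1 : (remaining.dropWhile (· != ' ')).length ≤ remaining.length := List.length_dropWhile_le _ _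
  have h2 : 0 < remaining.length := List.length_pos_iff.mpr h
  cases hd : remaining.dropWhile (· != ' ') with
  | nil => simpa using h2
  | cons a t =>
    rw [hd] at h1
    simp only [List.drop_succ_cons, List.drop_zero, List.length_cons] at h1 ⊢
    omega

def strip_instrument_prefixes_py (instrument : String) : Option String :=
  (pvALoop instrument.toList).map String.ofList

-- ===== PORT B =====
def pvPrefixesB : PySem.Set (List Char) :=
  PySem.Set.ofList ["additional".toList, "guest".toList, "solo".toList]

-- the for/enumerate loop of B: the suffix `w :: ws` is words[i:]; `result or None`.
def pvBLoop (words : List (List Char)) : Option (List Char) :=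
  match words with
  | [] => none
  | w :: ws =>
    if pvPrefixesB.contains w then pvBLoop ws
    else
      let result := PySem.Chars.join [' '] (w :: ws)
      if result = [] then none else some result

def strip_instrument_prefixes_py_alt (instrument : String) : Option String :=
  (pvBLoop (PySem.Chars.splitOn instrument.toList [' '])).map String.ofList

-- ===== PRECONDITION & SPEC =====
def Spec_strip_instrument_prefixes_py (instrument : String) (out : Option String) : Prop := out = strip_instrument_prefixes_py_alt instrument
instance (instrument : String) (out : Option String) : Decidable (Spec_strip_instrument_prefixes_py instrument out) := by unfold Spec_strip_instrument_prefixes_py; infer_instance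

-- ===== CLAIM (what is proved, stated in full; the proofs are below) =====
def Claim_equal_strip_instrument_prefixes_py : Prop := ∀ (instrument : String), Dom_strip_instrument_prefixes_py instrument → Spec_strip_instrument_prefixes_py instrument (strip_instrument_prefixes_py instrument)

-- ===== LEMMAS AND PROOFS =====

-- structural description of splitting on a single space
def pvSplitSp : List Char → List (List Char)
  | [] => [[]]
  | c :: rest => if c = ' ' then [] :: pvSplitSp rest else (pvSplitSp rest).modifyHead (c :: ·)

theorem pvSplitSp_ne_nil (cs : List Char) : pvSplitSp cs ≠ [] := by
  induction cs with
  | nil => simp [pvSplitSp]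
  | cons c rest ih =>
    simp only [pvSplitSp]
    split
    · simp
    · cases h : pvSplitSp rest with
      | nil => exact absurd h ih
      | cons a t => simp

theorem pvGo_eq (l : List Char) : ∀ (fuel : Nat) (cur : List Char) (acc : List (List Char)),
    l.length ≤ fuel →
    PySem.Chars.splitOn.go [' '] fuel l cur acc
      = acc.reverse ++ (pvSplitSp l).modifyHead (cur.reverse ++ ·) := by
  induction l with
  | nil =>
    intro fuel cur acc _
    cases fuel <;> simp [PySem.Chars.splitOn.go, pvSplitSp]
  | cons c rest ih =>
    intro fuel cur acc hf
    cases fuel with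
    | zero => simp at hf
    | succ n =>
      simp only [List.length_cons] at hf
      by_cases hc : c = ' '
      · subst hc
        have hpre : List.isPrefixOf [' '] (' ' :: rest) = true := by simp [List.isPrefixOf]
        simp only [PySem.Chars.splitOn.go, hpre, if_pos, List.length_cons, List.length_nil,
          List.drop_succ_cons, List.drop_zero]
        rw [ih n [] (cur.reverse :: acc) (by omega)]
        simp only [pvSplitSp]
        cases pvSplitSp rest <;> simp
      · have hpre : List.isPrefixOf [' '] (c :: rest) = false := by
          simp [List.isPrefixOf, Ne.symm hc]
        simp only [PySem.Chars.splitOn.go, hpre]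
        rw [if_neg (by simp), ih n (c :: cur) acc (by omega)]
        simp only [pvSplitSp, if_neg hc]
        cases h : pvSplitSp rest with
        | nil => exact absurd h (pvSplitSp_ne_nil rest)
        | cons a t => simp

theorem pvSplitOn_eq (cs : List Char) : PySem.Chars.splitOn cs [' '] = pvSplitSp cs := by
  have := pvGo_eq cs (cs.length + 1) [] [] (by omega)
  simp only [PySem.Chars.splitOn, this, List.reverse_nil, List.nil_append]
  cases h : pvSplitSp cs with
  | nil => exact absurd h (pvSplitSp_ne_nil cs)
  | cons a t => simp

theorem pvJoin_pvSplitSp (cs : List Char) : PySem.Chars.join [' '] (pvSplitSp cs) = cs := by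
  induction cs with
  | nil => simp [pvSplitSp, PySem.Chars.join, List.intercalate]
  | cons c rest ih =>
    simp only [pvSplitSp]
    by_cases hc : c = ' '
    · subst hc
      rw [if_pos rfl]
      cases h : pvSplitSp rest with
      | nil => exact absurd h (pvSplitSp_ne_nil rest)
      | cons a t =>
        rw [h] at ih
        rw [PySem.Chars.join_cons_cons]
        simp [← ih]
    · rw [if_neg hc]
      cases h : pvSplitSp rest with
      | nil => exact absurd h (pvSplitSp_ne_nil rest)
      | cons a t =>
        rw [h] at ih
        cases t with
        | nil =>
          simp only [List.modifyHead, PySem.Chars.join_singleton] at *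
          simp [ih]
        | cons b t' =>
          simp only [List.modifyHead] at *
          rw [PySem.Chars.join_cons_cons] at ih ⊢
          simp [← ih]

theorem pvSplitSp_decomp (cs : List Char) :
    pvSplitSp cs = cs.takeWhile (· != ' ') ::
      (if cs.dropWhile (· != ' ') = [] then ([] : List (List Char))
       else pvSplitSp ((cs.dropWhile (· != ' ')).drop 1)) := by
  induction cs with
  | nil => simp [pvSplitSp]
  | cons c rest ih =>
    by_cases hc : c = ' '
    · subst hc
      simp [pvSplitSp, List.takeWhile, List.dropWhile]
    · have hb : (c != ' ') = true := by simp [hc]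
      simp only [pvSplitSp, if_neg hc, List.takeWhile_cons, List.dropWhile_cons, hb]
      rw [ih]
      simp

theorem pvMain (cs : List Char) : pvALoop cs = pvBLoop (pvSplitSp cs) := by
  generalize hn : cs.length = n
  induction n using Nat.strong_induction_on generalizing cs with
  | _ n ih =>
  rw [pvALoop, pvSplitSp_decomp cs]
  by_cases h0 : cs = []
  · subst h0
    simp [pvBLoop, PySem.Chars.join, List.intercalate]
  · rw [if_neg h0]
    have hPP : pvPrefixesB = pvPrefixesA := rfl
    have htd := List.takeWhile_append_dropWhile (p := (· != ' ')) (l := cs)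
    cases hrest : cs.dropWhile (· != ' ') with
    | nil =>
      have hpre : cs.takeWhile (· != ' ') = cs := by rw [hrest, List.append_nil] at htd; exact htd
      rw [if_pos rfl]
      simp only [hpre, List.take_nil, List.drop_nil]
      by_cases hmem : pvPrefixesA.contains cs = true
      · rw [if_pos hmem, pvBLoop, hPP, if_pos hmem, pvALoop]
        simp [pvBLoop]
      · rw [if_neg hmem, pvBLoop, hPP, if_neg hmem]
        simp only [PySem.Chars.join_singleton]
        rw [if_neg h0]
        simp
    | cons r rem =>
      have hr : r = ' ' := by
        clear ih hn htd h0 hPP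
        induction cs with
        | nil => simp at hrest
        | cons c t ihc =>
          rw [List.dropWhile_cons] at hrest
          by_cases hc : c = ' '
          · simp [hc] at hrest; simp [hrest.1.symm]
          · simp [hc] at hrest; exact ihc hrest
      subst hr
      have hlen : rem.length < n := by
        have hl : cs.length = (cs.takeWhile (· != ' ')).length + (cs.dropWhile (· != ' ')).length := by
          rw [← List.length_append, htd]
        rw [hrest] at hl
        simp only [List.length_cons] at hl
        omega
      simp only [List.take_succ_cons, List.take_zero, List.drop_succ_cons, List.drop_zero]
      rw [if_neg (List.cons_ne_nil ' ' rem)]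
      rw [pvBLoop, hPP]
      by_cases hmem : pvPrefixesA.contains (cs.takeWhile (· != ' ')) = true
      · rw [if_pos hmem, if_pos hmem]
        exact ih rem.length hlen rem rfl
      · rw [if_neg hmem, if_neg hmem]
        cases hsp : pvSplitSp rem with
        | nil => exact absurd hsp (pvSplitSp_ne_nil rem)
        | cons a t =>
          have hj : PySem.Chars.join [' '] (a :: t) = rem := by
            rw [← hsp]; exact pvJoin_pvSplitSp rem
          rw [PySem.Chars.join_cons_cons, hj]
          rw [if_neg (by simp)]

-- ===== VERDICT (by name: the statement is the Claim_ definition above) =====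
theorem strip_instrument_prefixes_py_spec : Claim_equal_strip_instrument_prefixes_py := by
  intro instrument _
  unfold Spec_strip_instrument_prefixes_py strip_instrument_prefixes_py strip_instrument_prefixes_py_alt
  rw [pvSplitOn_eq, ← pvMain]
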